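-- pv_equiv track=rewrite | github.com/applepythonvn/python | bài đã làm thành công/boitinhyeu.py | boi_tinh_yeu
-- ===== SOURCE A (Python) =====
-- def boi_tinh_yeu(ten_nam, ten_nu):
--
-- 	#Chuyển thành viết thường
-- 	ten_nam=ten_nam.lower()
-- 	ten_nu=ten_nu.lower()
--
-- 	#Chính
-- 	dem=0
-- 	#Chuyển bảng chữ cái thành số
-- 	for bang_chu_cai in range(ord('a'), ord('z')+1):
-- 		#tổng 2 số trùng nhau từ tên
-- 		if (chr(bang_chu_cai) in ten_nam) and (chr(bang_chu_cai) in ten_nu):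
-- 			#Biến đểm để đếm các sỗ được lấy từ tên nam và tên nữ trùng nhau
-- 			dem=dem+1
--
-- 	#Bói
-- 	if dem==0:
-- 		ket_qua= "Không hợp nhau"
-- 	elif dem < 4:
-- 		ket_qua= "Bạn bè"
-- 	else:
-- 		ket_qua="Hợp nhau"
-- 	return ket_qua
-- ===== SOURCE B (Python) =====
-- def boi_tinh_yeu(ten_nam, ten_nu):
--     common = set(ten_nam.lower()) & set(ten_nu.lower())
--     dem = sum(1 for c in common if 'a' <= c <= 'z')
--     if dem == 0:
--         return "Không hợp nhau"
--     if dem < 4: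
--         return "Bạn bè"
--     return "Hợp nhau"
-- ===== Notes on version B (the rewrite author's own statement) =====
-- stated objective: idiomatic
-- what changed: Replaces the 26-iteration alphabet scan with per-character substring tests by a set intersection of the two lowered names, counting the shared characters that are English letters.
import Mathlib
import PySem

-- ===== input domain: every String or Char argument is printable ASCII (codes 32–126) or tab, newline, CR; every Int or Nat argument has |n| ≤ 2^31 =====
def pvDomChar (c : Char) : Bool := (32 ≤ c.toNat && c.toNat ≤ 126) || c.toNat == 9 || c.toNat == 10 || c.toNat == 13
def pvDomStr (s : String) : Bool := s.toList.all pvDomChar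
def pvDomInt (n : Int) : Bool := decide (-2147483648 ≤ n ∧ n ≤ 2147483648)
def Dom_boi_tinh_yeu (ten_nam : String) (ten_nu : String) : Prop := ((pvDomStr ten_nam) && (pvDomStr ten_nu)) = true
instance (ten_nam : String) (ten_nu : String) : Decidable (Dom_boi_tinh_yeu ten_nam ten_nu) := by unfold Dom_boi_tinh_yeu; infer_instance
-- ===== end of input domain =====

-- B replaces A's 26-iteration alphabet scan (a substring test per letter) by a set
-- intersection of the two lowered names filtered to English letters; same verdicts.


-- ===== PORT A =====
-- 'chr(i) in s' is ported as PySem.Str.isIn of the one-character string (exact);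
-- Char.ofNat i.toNat is exact for i in range(97, 123), where 0 ≤ i.
def boi_tinh_yeu (ten_nam : String) (ten_nu : String) : String :=
  let nam := PySem.Str.lower ten_nam
  let nu := PySem.Str.lower ten_nu
  let dem : Int := (PySem.List.pyRange 97 123 1).foldl
    (fun dem i =>
      if PySem.Str.isIn (String.ofList [Char.ofNat i.toNat]) nam
          && PySem.Str.isIn (String.ofList [Char.ofNat i.toNat]) nu
      then dem + 1 else dem) 0
  if dem == 0 then "Không hợp nhau"
  else if dem < 4 then "Bạn bè"
  else "Hợp nhau"

-- ===== PORT B =====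
-- set(x) & set(y) is PySem.Set.inter of PySem.Set.ofList; the order-insensitive
-- 'sum(1 for c in common if …)' is ported as countP over the set's element list.
def boi_tinh_yeu_alt (ten_nam : String) (ten_nu : String) : String :=
  let common := PySem.Set.inter (PySem.Set.ofList (PySem.Str.lower ten_nam).toList)
                                (PySem.Set.ofList (PySem.Str.lower ten_nu).toList)
  let dem : Int := (common.countP (fun c => decide ('a' ≤ c) && decide (c ≤ 'z')) : Nat)
  if dem == 0 then "Không hợp nhau"
  else if dem < 4 then "Bạn bè"
  else "Hợp nhau"

-- ===== PRECONDITION & SPEC =====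
def Spec_boi_tinh_yeu (ten_nam : String) (ten_nu : String) (out : String) : Prop := out = boi_tinh_yeu_alt ten_nam ten_nu
instance (ten_nam : String) (ten_nu : String) (out : String) : Decidable (Spec_boi_tinh_yeu ten_nam ten_nu out) := by unfold Spec_boi_tinh_yeu; infer_instance

-- ===== CLAIM (what is proved, stated in full; the proofs are below) =====
def Claim_equal_boi_tinh_yeu : Prop := ∀ (ten_nam : String) (ten_nu : String), Dom_boi_tinh_yeu ten_nam ten_nu → Spec_boi_tinh_yeu ten_nam ten_nu (boi_tinh_yeu ten_nam ten_nu)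

-- ===== LEMMAS AND PROOFS =====

-- a one-character substring test is a membership test
theorem isIn_singleton (c : Char) (l : List Char) :
    PySem.Chars.isIn [c] l = decide (c ∈ l) := by
  by_cases h : c ∈ l
  · simpa [h] using (PySem.Chars.isIn_iff_infix [c] l).mpr ((List.singleton_infix_iff c l).mpr h)
  · simp only [h, decide_false]
    by_contra hne
    exact h ((List.singleton_infix_iff c l).mp
      ((PySem.Chars.isIn_iff_infix [c] l).mp (Bool.of_not_eq_false hne)))

theorem toNat_ofNat_valid (n : Nat) (h : n < 55296) : (Char.ofNat n).toNat = n := by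
  rw [Char.toNat_ofNat]
  have : n.isValidChar := Or.inl h
  simp [this]

-- the core counting fact: A's alphabet scan and B's filtered intersection count the same set
theorem count_common (nam nu : List Char) :
    (List.range 26).countP
      (fun k => decide (Char.ofNat (97 + k) ∈ nam) && decide (Char.ofNat (97 + k) ∈ nu))
    = (PySem.Set.ofList nam).countP
      (fun c => (decide ('a' ≤ c) && decide (c ≤ 'z')) && decide (c ∈ nu)) := by
  rw [List.countP_eq_length_filter, List.countP_eq_length_filter,
      ← List.toFinset_card_of_nodup ((List.nodup_range).filter _),
      ← List.toFinset_card_of_nodup ((PySem.Set.nodup_ofList nam).filter _),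
      List.toFinset_filter, List.toFinset_filter, List.toFinset_range]
  refine Finset.card_bij (fun k _ => Char.ofNat (97 + k)) ?_ ?_ ?_
  · intro k hk
    simp only [Finset.mem_filter, Finset.mem_range, Bool.and_eq_true, decide_eq_true_eq,
      List.mem_toFinset] at hk ⊢
    obtain ⟨hk26, hnam, hnu⟩ := hk
    have ht : (Char.ofNat (97 + k)).toNat = 97 + k := toNat_ofNat_valid _ (by omega)
    refine ⟨(PySem.Set.mem_ofList nam _).mpr hnam, ⟨?_, ?_⟩, hnu⟩
    · show ('a').toNat ≤ (Char.ofNat (97 + k)).toNat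
      simp [ht]
    · show (Char.ofNat (97 + k)).toNat ≤ ('z').toNat
      simp [ht]; omega
  · intro k₁ h₁ k₂ h₂ heq
    simp only [Finset.mem_filter, Finset.mem_range] at h₁ h₂
    have := congrArg Char.toNat heq
    rw [toNat_ofNat_valid _ (by omega), toNat_ofNat_valid _ (by omega)] at this
    omega
  · intro c hc
    simp only [Finset.mem_filter, Bool.and_eq_true, decide_eq_true_eq,
      List.mem_toFinset] at hc
    obtain ⟨hmem, ⟨ha, hz⟩, hnu⟩ := hc
    have ha' : 97 ≤ c.toNat := ha
    have hz' : c.toNat ≤ 122 := hz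
    refine ⟨c.toNat - 97, ?_, ?_⟩
    · simp only [Finset.mem_filter, Finset.mem_range, Bool.and_eq_true, decide_eq_true_eq]
      have he : Char.ofNat (97 + (c.toNat - 97)) = c := by
        have : 97 + (c.toNat - 97) = c.toNat := by omega
        rw [this, Char.ofNat_toNat]
      refine ⟨by omega, ?_, ?_⟩ <;> rw [he]
      · exact (PySem.Set.mem_ofList nam c).mp hmem
      · exact hnu
    · show Char.ofNat (97 + (c.toNat - 97)) = c
      have : 97 + (c.toNat - 97) = c.toNat := by omega
      rw [this, Char.ofNat_toNat]

-- ===== VERDICT (by name: the statement is the Claim_ definition above) =====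
theorem boi_tinh_yeu_spec : Claim_equal_boi_tinh_yeu := by
  intro ten_nam ten_nu _
  unfold Spec_boi_tinh_yeu
  have hdem :
      (PySem.List.pyRange 97 123 1).foldl
        (fun dem i =>
          if PySem.Str.isIn (String.ofList [Char.ofNat i.toNat]) (PySem.Str.lower ten_nam)
              && PySem.Str.isIn (String.ofList [Char.ofNat i.toNat]) (PySem.Str.lower ten_nu)
          then dem + 1 else dem) (0 : Int)
      = ((PySem.Set.inter (PySem.Set.ofList (PySem.Str.lower ten_nam).toList)
            (PySem.Set.ofList (PySem.Str.lower ten_nu).toList)).countP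
            (fun c => decide ('a' ≤ c) && decide (c ≤ 'z')) : Nat) := by
    rw [PySem.List.foldl_if_add_one, PySem.List.pyRange_one, List.countP_map, zero_add]
    have hr : ((123 : Int) - 97).toNat = 26 := by decide
    rw [hr]
    congr 1
    rw [PySem.Set.inter, List.countP_filter]
    simp only [PySem.Set.contains_eq_decide, PySem.Set.mem_ofList]
    rw [← count_common (PySem.Str.lower ten_nam).toList (PySem.Str.lower ten_nu).toList]
    apply List.countP_congr
    intro k hk
    have hk26 : k < 26 := List.mem_range.mp hk
    have ht : ((97 : Int) + k).toNat = 97 + k := by omega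
    simp only [Function.comp, PySem.Str.isIn_eq, String.toList_ofList, ht, isIn_singleton]
  simp only [boi_tinh_yeu, boi_tinh_yeu_alt, hdem]
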